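-- pv_equiv track=rewrite | github.com/lcorbel/BridgeThesis | shadow_best_player_movieV2.py | _auction_complete
-- ===== SOURCE A (Python) =====
-- from typing import Dict, Iterable, Iterator, List, Optional, Tuple
--
-- def _is_contract_bid(tok: str) -> bool:
--     t = tok.upper()
--     return len(t) >= 2 and t[0] in "1234567" and t[1] in "CDHSN"
--
-- def _auction_complete(bids: List[str]) -> bool:
--     if not bids:
--         return False
--     i = len(bids) - 1
--     trailing_passes = 0
--     while i >= 0 and bids[i] == 'P':
--         trailing_passes += 1
--         i -= 1
--     if trailing_passes < 3:
--         return False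
--     return any(_is_contract_bid(b) for b in bids[:i+1])
-- ===== SOURCE B (Python) =====
-- def _is_contract_bid(tok: str) -> bool:
--     t = tok.upper()
--     return len(t) >= 2 and t[0] in "1234567" and t[1] in "CDHSN"
--
-- def _auction_complete(bids):
--     trailing = 0
--     has_contract = False
--     for b in bids:
--         trailing = trailing + 1 if b == 'P' else 0
--         if _is_contract_bid(b):
--             has_contract = True
--     return trailing >= 3 and has_contract
-- ===== Notes on version B (the rewrite author's own statement) =====
-- stated objective: simpler
-- what changed: Replaced A's two-pass structure (backward while-loop counting trailing passes, then a forward any() scan over the prefix slice) by a single forward loop maintaining a reset-on-non-pass trailing counter and a cumulative has-contract flag; correct because contract bids never occur inside the trailing pass run.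
import Mathlib
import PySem

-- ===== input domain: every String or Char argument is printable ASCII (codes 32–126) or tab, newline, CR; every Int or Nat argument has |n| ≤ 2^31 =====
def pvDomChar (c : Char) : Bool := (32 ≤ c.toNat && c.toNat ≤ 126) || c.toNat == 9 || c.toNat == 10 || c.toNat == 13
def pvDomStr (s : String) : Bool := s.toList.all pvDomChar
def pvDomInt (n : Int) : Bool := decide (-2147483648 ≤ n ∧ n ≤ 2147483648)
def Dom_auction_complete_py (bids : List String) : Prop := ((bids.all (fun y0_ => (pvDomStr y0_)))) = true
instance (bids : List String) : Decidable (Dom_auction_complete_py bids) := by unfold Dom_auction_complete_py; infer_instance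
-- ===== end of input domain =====

-- B replaces A's two-pass check (backward trailing-pass count, then a forward scan of the
-- prefix slice) by one forward loop with two accumulators; objective: simpler.

-- ===== PORT A =====
-- _is_contract_bid (shared helper of both Pythons)
def isContractBid (tok : String) : Bool :=
  let t := PySem.Chars.upper tok.toList
  decide (2 ≤ t.length) &&
    (match PySem.List.pyGet? t 0, PySem.List.pyGet? t 1 with
     | some c0, some c1 =>
         PySem.Chars.isIn [c0] "1234567".toList && PySem.Chars.isIn [c1] "CDHSN".toList
     | _, _ => false)

-- the backward while loop: n plays the role of i+1; returns (final i+1, trailing_passes)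
def auctionWhile (bids : List String) : Nat → Nat → Nat × Nat
  | 0, trailing => (0, trailing)
  | m + 1, trailing =>
    if ((PySem.List.pyGet? bids (m : Int)).getD "") == "P" then
      auctionWhile bids m (trailing + 1)
    else (m + 1, trailing)

def auction_complete_py (bids : List String) : Bool :=
  if bids.isEmpty then false
  else
    let r := auctionWhile bids bids.length 0
    if r.2 < 3 then false
    else (PySem.List.slice bids none (some ((r.1 : Nat) : Int))).any isContractBid

-- ===== PORT B =====
def auction_complete_py_alt (bids : List String) : Bool :=
  let st := bids.foldl (fun (st : Nat × Bool) b =>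
      (if b == "P" then st.1 + 1 else 0, st.2 || isContractBid b)) (0, false)
  decide (3 ≤ st.1) && st.2

-- ===== PRECONDITION & SPEC =====
def Spec_auction_complete_py (bids : List String) (out : Bool) : Prop := out = auction_complete_py_alt bids
instance (bids : List String) (out : Bool) : Decidable (Spec_auction_complete_py bids out) := by unfold Spec_auction_complete_py; infer_instance

-- ===== CLAIM (what is proved, stated in full; the proofs are below) =====
def Claim_equal_auction_complete_py : Prop := ∀ (bids : List String), Dom_auction_complete_py bids → Spec_auction_complete_py bids (auction_complete_py bids)

-- ===== LEMMAS AND PROOFS =====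

-- length of the trailing all-'P' run
def tc (xs : List String) : Nat := (xs.reverse.takeWhile (fun b => b == "P")).length

lemma tw_len_iff (p : String → Bool) (l : List String) :
    ((l.takeWhile p).length = l.length) ↔ l.all p = true := by
  constructor
  · intro h
    have heq : l.takeWhile p = l := (List.takeWhile_prefix p).eq_of_length h
    rw [List.all_eq_true]
    intro a ha
    exact List.mem_takeWhile_imp (p := p) (by rw [heq]; exact ha)
  · intro h
    rw [List.takeWhile_eq_self_iff.mpr (by simpa [List.all_eq_true] using h)]

lemma tc_cons_of_all (x : String) (xs : List String)
    (hall : xs.all (fun b => b == "P") = true) (hx : (x == "P") = false) :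
    tc (x :: xs) = xs.length := by
  have hrev : (xs.reverse.takeWhile (fun b => b == "P")).length = xs.reverse.length :=
    (tw_len_iff _ _).mpr (by simpa using hall)
  simp only [tc, List.reverse_cons, List.takeWhile_append, List.length_reverse] at *
  rw [if_pos hrev]
  simp [hx]

lemma tc_cons_of_not_all (x : String) (xs : List String)
    (hall : ¬ xs.all (fun b => b == "P") = true) :
    tc (x :: xs) = tc xs := by
  have hrev : ¬ (xs.reverse.takeWhile (fun b => b == "P")).length = xs.reverse.length := by
    rw [tw_len_iff]; simpa using hall
  simp only [tc, List.reverse_cons, List.takeWhile_append, List.length_reverse] at *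
  rw [if_neg hrev]

lemma tc_of_all (xs : List String) (hall : xs.all (fun b => b == "P") = true) :
    tc xs = xs.length := by
  have := (tw_len_iff (fun b => b == "P") xs.reverse).mpr (by simpa using hall)
  simpa [tc] using this

lemma auctionWhile_eq (bids : List String) :
    ∀ n tr, n ≤ bids.length →
      auctionWhile bids n tr = (n - tc (bids.take n), tr + tc (bids.take n)) := by
  intro n
  induction n with
  | zero => intro tr _; simp [auctionWhile, tc]
  | succ m ih =>
    intro tr h
    have hm : m < bids.length := by omega
    have hget : PySem.List.pyGet? bids (m : Int) = some bids[m] := by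
      simp [PySem.List.pyGet?_natCast, List.getElem?_eq_getElem hm]
    have htake : bids.take (m + 1) = bids.take m ++ [bids[m]] := by
      rw [List.take_add_one, List.getElem?_eq_getElem hm]
      rfl
    rw [auctionWhile, hget]
    simp only [Option.getD_some]
    by_cases hP : (bids[m] == "P") = true
    · rw [if_pos hP, ih (tr + 1) (by omega)]
      have : tc (bids.take (m + 1)) = tc (bids.take m) + 1 := by
        unfold tc
        rw [htake, List.reverse_append]
        simp [hP]
      rw [this]
      simp only [Prod.mk.injEq]
      constructor <;> omega
    · rw [if_neg hP]
      have : tc (bids.take (m + 1)) = 0 := by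
        unfold tc
        rw [htake, List.reverse_append]
        simp [hP]
      rw [this]
      simp

lemma foldB_eq (xs : List String) :
    ∀ tr h, xs.foldl (fun (st : Nat × Bool) b =>
        (if b == "P" then st.1 + 1 else 0, st.2 || isContractBid b)) (tr, h)
      = ((if xs.all (fun b => b == "P") then tr + xs.length else tc xs),
         h || xs.any isContractBid) := by
  induction xs with
  | nil => intro tr h; simp
  | cons x xs ih =>
    intro tr h
    rw [List.foldl_cons, ih]
    by_cases hx : (x == "P") = true
    · by_cases hall : xs.all (fun b => b == "P") = true
      · simp only [hx, if_pos, List.all_cons, hall, Bool.and_true, List.length_cons,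
          List.any_cons]
        simp only [Prod.mk.injEq]
        exact ⟨by omega, by rw [Bool.or_assoc]⟩
      · have hall' : ((x :: xs).all (fun b => b == "P")) = false := by
          simp [List.all_cons]; intro _; simpa using hall
        rw [tc_cons_of_not_all x xs hall]
        simp [hall, hall', Bool.or_assoc]
    · have hx' : (x == "P") = false := by simpa using hx
      have hall' : ((x :: xs).all (fun b => b == "P")) = false := by
        simp [List.all_cons, hx']
      by_cases hall : xs.all (fun b => b == "P") = true
      · rw [tc_cons_of_all x xs hall hx']
        simp [hx', hall, hall', Bool.or_assoc]
      · rw [tc_cons_of_not_all x xs hall]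
        simp [hall, hall', Bool.or_assoc]

lemma isContractBid_P : isContractBid "P" = false := by decide

-- the dropped trailing-pass suffix contains no contract bid
lemma drop_any_false (bids : List String) :
    (bids.drop (bids.length - tc bids)).any isContractBid = false := by
  have hpre : bids.reverse.takeWhile (fun b => b == "P") <+: bids.reverse :=
    List.takeWhile_prefix _
  have htake : bids.reverse.take (tc bids) = bids.reverse.takeWhile (fun b => b == "P") :=
    (List.prefix_iff_eq_take.mp hpre).symm
  have hdrop : bids.drop (bids.length - tc bids) = (bids.reverse.take (tc bids)).reverse := by
    rw [List.take_reverse, List.reverse_reverse]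
  rw [hdrop, htake, List.any_reverse, List.any_eq_false]
  intro b hb
  have hP : (b == "P") = true := List.mem_takeWhile_imp (p := fun b => b == "P") hb
  have hb' : b = "P" := by simpa using hP
  rw [hb', isContractBid_P]
  simp

lemma any_take_eq (bids : List String) :
    (bids.take (bids.length - tc bids)).any isContractBid = bids.any isContractBid := by
  conv_rhs => rw [← List.take_append_drop (bids.length - tc bids) bids]
  rw [List.any_append, drop_any_false, Bool.or_false]

lemma altB_eq (bids : List String) :
    auction_complete_py_alt bids = (decide (3 ≤ tc bids) && bids.any isContractBid) := by
  unfold auction_complete_py_alt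
  rw [foldB_eq]
  by_cases hall : bids.all (fun b => b == "P") = true
  · rw [tc_of_all bids hall]
    simp [hall]
  · simp [hall]

-- ===== VERDICT (by name: the statement is the Claim_ definition above) =====
theorem auction_complete_py_spec : Claim_equal_auction_complete_py := by
  intro bids _
  unfold Spec_auction_complete_py
  rw [altB_eq]
  unfold auction_complete_py
  rw [auctionWhile_eq bids bids.length 0 le_rfl]
  simp only [List.take_length, Nat.zero_add]
  by_cases hnil : bids = []
  · subst hnil; simp [tc]
  · rw [if_neg (by simpa using hnil)]
    by_cases h3 : tc bids < 3
    · rw [if_pos (by simpa using h3)]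
      have : ¬ (3 ≤ tc bids) := by omega
      simp [this]
    · rw [if_neg (by simpa using h3)]
      rw [PySem.List.slice_to_natCast, any_take_eq]
      have : (3 ≤ tc bids) := by omega
      simp [this]
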